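-- pv_equiv track=rewrite | github.com/ksanthoshNT/checkbox_fix | client_code/trade_finance_structure_document/src/main/checkbox_detection/main.py | find_closest_left_right_bbox
-- ===== SOURCE A (Python) =====
-- import heapq
--
-- def find_closest_left_right_bbox(bbox_coordinates, ocr_coords_lst):
--     x_min, y_min, x_max, y_max = bbox_coordinates
--     closest_left_bbox_coords = []
--     heapq.heapify(closest_left_bbox_coords)
--     closest_right_bbox_coords = []
--     heapq.heapify(closest_right_bbox_coords)
--     for key_bbox_coordinates in ocr_coords_lst:
--         if key_bbox_coordinates == bbox_coordinates:
--             continue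
--         x1, y1, x2, y2 = key_bbox_coordinates
--
--         if (abs(y1 - y_min)/100 <= 0.2 and abs(y2 - y_max)/100 <= 0.2):
--             if x2  <= x_min + 12:
--                 current_left_dist = x_min - x2
--
--                 if current_left_dist > 0:
--                     heapq.heappush(closest_left_bbox_coords, (-current_left_dist, key_bbox_coordinates))
--                     if len(closest_left_bbox_coords) > 2:
--                         heapq.heappop(closest_left_bbox_coords)
--
--             if x1 >= x_max - 12:
--                 current_right_dist = (x1 - x_max)
--                 current_right_dist = 0 if current_right_dist < 0 else current_right_dist
--                 heapq.heappush(closest_right_bbox_coords, (-current_right_dist, key_bbox_coordinates))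
--                 if len(closest_right_bbox_coords) > 2:
--                     heapq.heappop(closest_right_bbox_coords)
--
--     left_bbox_coords = [(-dist, coords) for dist, coords in (closest_left_bbox_coords)]
--     right_bbox_coords = [(-dist, coords) for dist, coords in (closest_right_bbox_coords)]
--     left_bbox_coords.sort(key=lambda x:x[0])
--     right_bbox_coords.sort(key=lambda x:x[0])
--     return ((left_bbox_coords), (right_bbox_coords))
-- ===== SOURCE B (Python) =====
-- def find_closest_left_right_bbox(bbox_coordinates, ocr_coords_lst):
--     x_min, y_min, x_max, y_max = bbox_coordinates
--     left_cands = []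
--     right_cands = []
--     for kb in ocr_coords_lst:
--         if kb == bbox_coordinates:
--             continue
--         x1, y1, x2, y2 = kb
--         if abs(y1 - y_min) / 100 <= 0.2 and abs(y2 - y_max) / 100 <= 0.2:
--             if x2 <= x_min + 12 and x_min - x2 > 0:
--                 left_cands.append((x2 - x_min, kb))
--             if x1 >= x_max - 12:
--                 d = x1 - x_max
--                 right_cands.append((-d if d > 0 else 0, kb))
--     left = sorted((-nd, c) for nd, c in sorted(left_cands)[-2:])
--     right = sorted((-nd, c) for nd, c in sorted(right_cands)[-2:])
--     return (left, right)
-- ===== Notes on version B (the rewrite author's own statement) =====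
-- stated objective: simpler
-- what changed: B drops the two bounded heapq heaps maintained inside the loop: it just appends qualifying (-dist, coords) candidates to plain lists and, after the loop, keeps the two lexicographically largest with sorted(cands)[-2:] before building each sorted output.
import Mathlib
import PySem

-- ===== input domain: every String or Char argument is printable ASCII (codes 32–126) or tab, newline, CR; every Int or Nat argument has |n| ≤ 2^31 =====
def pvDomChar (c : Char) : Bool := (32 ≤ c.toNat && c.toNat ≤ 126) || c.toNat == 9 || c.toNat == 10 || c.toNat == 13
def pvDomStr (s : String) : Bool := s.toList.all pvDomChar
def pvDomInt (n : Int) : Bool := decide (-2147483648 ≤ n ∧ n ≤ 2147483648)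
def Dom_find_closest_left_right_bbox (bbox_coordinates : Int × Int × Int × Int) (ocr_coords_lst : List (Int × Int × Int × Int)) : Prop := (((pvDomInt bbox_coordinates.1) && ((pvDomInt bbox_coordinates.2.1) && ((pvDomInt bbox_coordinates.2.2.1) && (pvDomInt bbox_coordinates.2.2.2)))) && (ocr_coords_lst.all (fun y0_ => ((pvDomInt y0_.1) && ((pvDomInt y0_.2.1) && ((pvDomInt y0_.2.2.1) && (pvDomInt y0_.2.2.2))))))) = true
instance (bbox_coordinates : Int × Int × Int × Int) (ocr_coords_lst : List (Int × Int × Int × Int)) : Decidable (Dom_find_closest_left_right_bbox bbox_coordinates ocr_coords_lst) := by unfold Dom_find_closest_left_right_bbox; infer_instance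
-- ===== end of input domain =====

-- B replaces A's two size-bounded heapq heaps maintained inside the loop by plain candidate lists,
-- selecting the two lexicographically largest entries once with sorted(cands)[-2:] after the loop (objective: simpler).


-- ===== PORT A =====
-- Python's '<' on the 5-int tuples (-dist, (x1, y1, x2, y2)) pushed on the heaps: exact lexicographic comparison.
def entLt (a b : Int × (Int × Int × Int × Int)) : Bool :=
  decide (a.1 < b.1 ∨ (a.1 = b.1 ∧ (a.2.1 < b.2.1 ∨ (a.2.1 = b.2.1 ∧
    (a.2.2.1 < b.2.2.1 ∨ (a.2.2.1 = b.2.2.1 ∧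
      (a.2.2.2.1 < b.2.2.2.1 ∨ (a.2.2.2.1 = b.2.2.2.1 ∧ a.2.2.2.2 < b.2.2.2.2))))))))

-- heapq._siftdown(heap, startpos, pos), step for step (newitem = heap[pos] carried as a parameter;
-- the getD default is never read: every index is in range at every call site).
def siftdown (heap : List (Int × (Int × Int × Int × Int))) (startpos : Nat)
    (newitem : Int × (Int × Int × Int × Int)) (pos : Nat) : List (Int × (Int × Int × Int × Int)) :=
  if _h : startpos < pos then
    if entLt newitem (heap.getD ((pos - 1) / 2) newitem) then
      siftdown (heap.set pos (heap.getD ((pos - 1) / 2) newitem)) startpos newitem ((pos - 1) / 2)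
    else heap.set pos newitem
  else heap.set pos newitem
termination_by pos
decreasing_by omega

-- heapq.heappush: append, then sift down from the last position.
def heappush (heap : List (Int × (Int × Int × Int × Int))) (item : Int × (Int × Int × Int × Int)) :
    List (Int × (Int × Int × Int × Int)) :=
  siftdown (heap ++ [item]) 0 item heap.length

-- heapq._siftup(heap, pos): move the smaller child up until a leaf, then _siftdown back.
def siftupLoop (heap : List (Int × (Int × Int × Int × Int))) (startpos : Nat)
    (newitem : Int × (Int × Int × Int × Int)) (pos : Nat) : List (Int × (Int × Int × Int × Int)) :=
  if _h : 2 * pos + 1 < heap.length then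
    let childpos : Nat :=
      if 2 * pos + 2 < heap.length ∧
          ¬ entLt (heap.getD (2 * pos + 1) newitem) (heap.getD (2 * pos + 2) newitem) = true
      then 2 * pos + 2 else 2 * pos + 1
    siftupLoop (heap.set pos (heap.getD childpos newitem)) startpos newitem childpos
  else siftdown (heap.set pos newitem) startpos newitem pos
termination_by heap.length - pos
decreasing_by
  simp only [List.length_set]
  split <;> omega

-- heapq.heappop; A discards the popped value, so the port returns the new heap only.
-- (Python raises IndexError on an empty heap; A pops only heaps of length 3, so the [] branch is unreachable.)
def heappopDiscard (heap : List (Int × (Int × Int × Int × Int))) : List (Int × (Int × Int × Int × Int)) :=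
  match heap.getLast? with
  | none => []
  | some lastelt =>
      if heap.dropLast.isEmpty then []
      else siftupLoop (heap.dropLast.set 0 lastelt) 0 lastelt 0

-- 'heappush(h, x); if len(h) > 2: heappop(h)' — the push/trim step A performs on each heap.
def hstep (s : List (Int × (Int × Int × Int × Int))) (x : Int × (Int × Int × Int × Int)) :
    List (Int × (Int × Int × Int × Int)) :=
  if 2 < (heappush s x).length then heappopDiscard (heappush s x) else heappush s x

-- A's loop body (the two heaps as the pair state).  'abs(y1-y_min)/100 <= 0.2' is ported as |y1-y_min| ≤ 20:
-- exact for ints, since d/100 is correctly rounded and 20/100 = float('0.2') while 21/100 > float('0.2').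
def stepA (bbox : Int × Int × Int × Int)
    (st : List (Int × (Int × Int × Int × Int)) × List (Int × (Int × Int × Int × Int)))
    (kb : Int × Int × Int × Int) :
    List (Int × (Int × Int × Int × Int)) × List (Int × (Int × Int × Int × Int)) :=
  if kb = bbox then st
  else if |kb.2.1 - bbox.2.1| ≤ 20 ∧ |kb.2.2.2 - bbox.2.2.2| ≤ 20 then
    ( if kb.2.2.1 ≤ bbox.1 + 12 then
        if 0 < bbox.1 - kb.2.2.1 then hstep st.1 (-(bbox.1 - kb.2.2.1), kb) else st.1
      else st.1,
      if bbox.2.2.1 - 12 ≤ kb.1 then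
        hstep st.2 (-(if kb.1 - bbox.2.2.1 < 0 then 0 else kb.1 - bbox.2.2.1), kb)
      else st.2 )
  else st

def find_closest_left_right_bbox (bbox_coordinates : Int × Int × Int × Int) (ocr_coords_lst : List (Int × Int × Int × Int)) : (List (Int × (Int × Int × Int × Int))) × (List (Int × (Int × Int × Int × Int))) :=
  let st := ocr_coords_lst.foldl (stepA bbox_coordinates) ([], [])
  (PySem.List.sorted (st.1.map (fun p => (-p.1, p.2))) (fun p => p.1) false,
   PySem.List.sorted (st.2.map (fun p => (-p.1, p.2))) (fun p => p.1) false)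

-- ===== PORT B =====
-- Python's sorted() of a list of 5-int tuples: the same stable insertion fold PySem.List.sorted is
-- (PySem.List.sorted_eq_foldl_insertBy, rfl), with the key comparison replaced by the exact tuple '<';
-- stability is moot because comparison-equal tuples of ints are identical values.
def pySortedTuple (xs : List (Int × (Int × Int × Int × Int))) : List (Int × (Int × Int × Int × Int)) :=
  xs.foldl (fun acc x => PySem.List.insertBy entLt x acc) []

def negEnt (p : Int × (Int × Int × Int × Int)) : Int × (Int × Int × Int × Int) := (-p.1, p.2)

-- B's loop body: just append the qualifying candidates.
def stepB (bbox : Int × Int × Int × Int)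
    (st : List (Int × (Int × Int × Int × Int)) × List (Int × (Int × Int × Int × Int)))
    (kb : Int × Int × Int × Int) :
    List (Int × (Int × Int × Int × Int)) × List (Int × (Int × Int × Int × Int)) :=
  if kb = bbox then st
  else if |kb.2.1 - bbox.2.1| ≤ 20 ∧ |kb.2.2.2 - bbox.2.2.2| ≤ 20 then
    ( if kb.2.2.1 ≤ bbox.1 + 12 ∧ 0 < bbox.1 - kb.2.2.1 then st.1 ++ [(kb.2.2.1 - bbox.1, kb)] else st.1,
      if bbox.2.2.1 - 12 ≤ kb.1 then
        st.2 ++ [(if 0 < kb.1 - bbox.2.2.1 then -(kb.1 - bbox.2.2.1) else 0, kb)]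
      else st.2 )
  else st

-- 'sorted((-nd, c) for nd, c in sorted(cands)[-2:])'
def renderB (c : List (Int × (Int × Int × Int × Int))) : List (Int × (Int × Int × Int × Int)) :=
  pySortedTuple ((PySem.List.slice (pySortedTuple c) (some (-2))).map negEnt)

def find_closest_left_right_bbox_alt (bbox_coordinates : Int × Int × Int × Int) (ocr_coords_lst : List (Int × Int × Int × Int)) : (List (Int × (Int × Int × Int × Int))) × (List (Int × (Int × Int × Int × Int))) :=
  let st := ocr_coords_lst.foldl (stepB bbox_coordinates) ([], [])
  (renderB st.1, renderB st.2)

-- ===== PRECONDITION & SPEC =====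
def Spec_find_closest_left_right_bbox (bbox_coordinates : Int × Int × Int × Int) (ocr_coords_lst : List (Int × Int × Int × Int)) (out : (List (Int × (Int × Int × Int × Int))) × (List (Int × (Int × Int × Int × Int)))) : Prop := out = find_closest_left_right_bbox_alt bbox_coordinates ocr_coords_lst
instance (bbox_coordinates : Int × Int × Int × Int) (ocr_coords_lst : List (Int × Int × Int × Int)) (out : (List (Int × (Int × Int × Int × Int))) × (List (Int × (Int × Int × Int × Int)))) : Decidable (Spec_find_closest_left_right_bbox bbox_coordinates ocr_coords_lst out) := by
  unfold Spec_find_closest_left_right_bbox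
  have h1 : DecidableEq (Int × (Int × Int × Int × Int)) := inferInstance
  have h2 : DecidableEq (List (Int × (Int × Int × Int × Int))) := instDecidableEqList
  have h3 : DecidableEq ((List (Int × (Int × Int × Int × Int))) × (List (Int × (Int × Int × Int × Int)))) := instDecidableEqProd
  exact h3 _ _

-- ===== CLAIM (what is proved, stated in full; the proofs are below) =====
def Claim_equal_find_closest_left_right_bbox : Prop := ∀ (bbox_coordinates : Int × Int × Int × Int) (ocr_coords_lst : List (Int × Int × Int × Int)), Dom_find_closest_left_right_bbox bbox_coordinates ocr_coords_lst → Spec_find_closest_left_right_bbox bbox_coordinates ocr_coords_lst (find_closest_left_right_bbox bbox_coordinates ocr_coords_lst)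


-- ===== LEMMAS AND PROOFS =====

-- the last two elements (Python's xs[-2:])
def last2 (l : List (Int × (Int × Int × Int × Int))) : List (Int × (Int × Int × Int × Int)) :=
  l.drop (l.length - 2)

-- how inserting x into a sorted list changes its last two elements
def ins2 (s : List (Int × (Int × Int × Int × Int))) (x : Int × (Int × Int × Int × Int)) :
    List (Int × (Int × Int × Int × Int)) :=
  match s with
  | [] => [x]
  | [a] => if entLt x a then [x, a] else [a, x]
  | a :: b :: _ => if entLt x a then [a, b] else if entLt x b then [x, b] else [b, x]

-- the two largest candidates so far, ascending: the common abstraction of A's heap state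
-- and of B's sorted(cands)[-2:]
def sel (c : List (Int × (Int × Int × Int × Int))) : List (Int × (Int × Int × Int × Int)) :=
  last2 (pySortedTuple c)

def SortedE (l : List (Int × (Int × Int × Int × Int))) : Prop :=
  l.Pairwise (fun a b => entLt b a = false)

lemma entLt_asymm {x y : Int × (Int × Int × Int × Int)} (h : entLt x y = true) : entLt y x = false := by
  obtain ⟨x1, x2, x3, x4, x5⟩ := x; obtain ⟨y1, y2, y3, y4, y5⟩ := y
  simp only [entLt, decide_eq_true_eq, decide_eq_false_iff_not] at *
  omega

lemma entLt_total_eq {x y : Int × (Int × Int × Int × Int)} (h1 : entLt x y = false)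
    (h2 : entLt y x = false) : x = y := by
  obtain ⟨x1, x2, x3, x4, x5⟩ := x; obtain ⟨y1, y2, y3, y4, y5⟩ := y
  simp only [entLt, decide_eq_false_iff_not] at *
  simp only [Prod.mk.injEq]
  omega

lemma entLt_trans_nlt {x a p : Int × (Int × Int × Int × Int)} (h1 : entLt x a = true)
    (h2 : entLt p a = false) : entLt x p = true := by
  obtain ⟨x1, x2, x3, x4, x5⟩ := x; obtain ⟨a1, a2, a3, a4, a5⟩ := a; obtain ⟨p1, p2, p3, p4, p5⟩ := p
  simp only [entLt, decide_eq_true_eq, decide_eq_false_iff_not] at *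
  omega

lemma insertBy_pos {x y : Int × (Int × Int × Int × Int)} (ys : List (Int × (Int × Int × Int × Int)))
    (h : entLt x y = true) : PySem.List.insertBy entLt x (y :: ys) = x :: y :: ys := by
  simp [PySem.List.insertBy, h]

lemma insertBy_neg {x y : Int × (Int × Int × Int × Int)} (ys : List (Int × (Int × Int × Int × Int)))
    (h : entLt x y = false) :
    PySem.List.insertBy entLt x (y :: ys) = y :: PySem.List.insertBy entLt x ys := by
  simp [PySem.List.insertBy, h]

lemma insertBy_length (x : Int × (Int × Int × Int × Int)) (s : List (Int × (Int × Int × Int × Int))) :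
    (PySem.List.insertBy entLt x s).length = s.length + 1 := by
  induction s with
  | nil => simp [PySem.List.insertBy]
  | cons y ys ih =>
    simp only [PySem.List.insertBy]
    split
    · simp
    · simp [ih]

lemma insertBy_sorted {s : List (Int × (Int × Int × Int × Int))}
    (x : Int × (Int × Int × Int × Int)) (hs : SortedE s) :
    SortedE (PySem.List.insertBy entLt x s) := by
  induction s with
  | nil => simp [PySem.List.insertBy, SortedE]
  | cons y ys ih =>
    rw [SortedE, List.pairwise_cons] at hs
    by_cases h : entLt x y = true
    · simp only [PySem.List.insertBy, h, if_pos]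
      refine List.pairwise_cons.2 ⟨?_, List.pairwise_cons.2 ⟨hs.1, hs.2⟩⟩
      intro z hz
      rcases List.mem_cons.1 hz with rfl | hz
      · exact entLt_asymm h
      · exact entLt_asymm (entLt_trans_nlt h (hs.1 z hz))
    · simp only [PySem.List.insertBy, h, if_false, Bool.false_eq_true]
      refine List.pairwise_cons.2 ⟨?_, ih hs.2⟩
      intro z hz
      rcases (PySem.List.mem_insertBy entLt x z ys).1 hz with rfl | hz
      · simpa using h
      · exact hs.1 z hz

lemma sorted_pySortedTuple (c : List (Int × (Int × Int × Int × Int))) : SortedE (pySortedTuple c) := by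
  have h : ∀ (l acc : List (Int × (Int × Int × Int × Int))), SortedE acc →
      SortedE (l.foldl (fun acc x => PySem.List.insertBy entLt x acc) acc) := by
    intro l
    induction l with
    | nil => intro acc h; exact h
    | cons y ys ih => intro acc h; exact ih _ (insertBy_sorted y h)
  exact h c [] (by simp [SortedE])

lemma last2_cons_of_le {l : List (Int × (Int × Int × Int × Int))}
    (y : Int × (Int × Int × Int × Int)) (h : 2 ≤ l.length) : last2 (y :: l) = last2 l := by
  unfold last2
  have h2 : (y :: l).length - 2 = (l.length - 2) + 1 := by simp; omega
  rw [h2, List.drop_succ_cons]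

lemma last2_length_of_le {l : List (Int × (Int × Int × Int × Int))} (h : 2 ≤ l.length) :
    (last2 l).length = 2 := by
  unfold last2; simp; omega

lemma last2_insertBy {s : List (Int × (Int × Int × Int × Int))}
    (x : Int × (Int × Int × Int × Int)) (hs : SortedE s) :
    last2 (PySem.List.insertBy entLt x s) = ins2 (last2 s) x := by
  induction s with
  | nil => simp [PySem.List.insertBy, last2, ins2]
  | cons a s ih =>
    cases s with
    | nil =>
      simp only [PySem.List.insertBy]
      by_cases h : entLt x a = true <;> simp [h, last2, ins2]
    | cons b t =>
      rw [SortedE, List.pairwise_cons] at hs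
      by_cases h : entLt x a = true
      · rw [insertBy_pos _ h, last2_cons_of_le x (by simp)]
        -- x sorts below everything, so the last two elements are unchanged
        obtain ⟨p, q, hpq⟩ := List.length_eq_two.1 (last2_length_of_le (l := a :: b :: t) (by simp))
        have hpmem : p ∈ a :: b :: t := by
          refine List.mem_of_mem_drop (l := a :: b :: t) (i := (a :: b :: t).length - 2) ?_
          have : p ∈ last2 (a :: b :: t) := by rw [hpq]; simp
          exact this
        have hp : entLt x p = true := by
          rcases List.mem_cons.1 hpmem with rfl | hm
          · exact h
          · exact entLt_trans_nlt h (hs.1 p hm)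
        rw [hpq]
        simp [ins2, hp]
      · have hx : entLt x a = false := by simpa using h
        rw [insertBy_neg _ hx, last2_cons_of_le a (by rw [insertBy_length]; simp), ih hs.2]
        cases t with
        | nil => simp [last2, ins2, hx]
        | cons c' t' => rw [last2_cons_of_le a (by simp)]

lemma sel_append (c : List (Int × (Int × Int × Int × Int))) (x : Int × (Int × Int × Int × Int)) :
    sel (c ++ [x]) = ins2 (sel c) x := by
  unfold sel pySortedTuple
  rw [List.foldl_append]
  exact last2_insertBy x (sorted_pySortedTuple c)

lemma length_last2_le (l : List (Int × (Int × Int × Int × Int))) : (last2 l).length ≤ 2 := by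
  unfold last2; simp; omega

lemma sel_shape (c : List (Int × (Int × Int × Int × Int))) :
    sel c = [] ∨ (∃ a, sel c = [a]) ∨ (∃ a b, sel c = [a, b] ∧ entLt b a = false) := by
  have hp : (sel c).Pairwise (fun a b => entLt b a = false) :=
    (sorted_pySortedTuple c).sublist (List.drop_sublist _ _)
  have hlen : (sel c).length ≤ 2 := length_last2_le _
  rcases hsel : sel c with _ | ⟨a, _ | ⟨b, _ | ⟨d, r⟩⟩⟩
  · exact Or.inl rfl
  · exact Or.inr (Or.inl ⟨a, rfl⟩)
  · refine Or.inr (Or.inr ⟨a, b, rfl, ?_⟩)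
    rw [hsel, List.pairwise_cons] at hp
    exact hp.1 b (by simp)
  · rw [hsel] at hlen; simp at hlen
-- heap computations on the three reachable heap shapes
lemma hstep_nil (x : Int × (Int × Int × Int × Int)) : hstep [] x = [x] := by
  simp [hstep, heappush, siftdown]

lemma hstep_one (a x : Int × (Int × Int × Int × Int)) :
    hstep [a] x = if entLt x a then [x, a] else [a, x] := by
  by_cases h : entLt x a = true <;>
    simp [hstep, heappush, siftdown, h, List.getD]

lemma hstep_two {a b : Int × (Int × Int × Int × Int)} (hab : entLt b a = false)
    (x : Int × (Int × Int × Int × Int)) : hstep [a, b] x = ins2 [a, b] x := by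
  by_cases hxa : entLt x a = true
  · by_cases hba : entLt a b = true
    · simp [hstep, heappush, siftdown, heappopDiscard, siftupLoop, hxa, hba, List.getD, ins2]
    · have heq : a = b := entLt_total_eq (by simpa using hba) hab
      subst heq
      simp [hstep, heappush, siftdown, heappopDiscard, siftupLoop, hxa, hba, List.getD, ins2]
  · by_cases hxb : entLt x b = true <;>
      simp [hstep, heappush, siftdown, heappopDiscard, siftupLoop, hxa, hxb, List.getD, ins2]

lemma hstep_sel (c : List (Int × (Int × Int × Int × Int))) (x : Int × (Int × Int × Int × Int)) :
    hstep (sel c) x = ins2 (sel c) x := by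
  rcases sel_shape c with h | ⟨a, h⟩ | ⟨a, b, h, hab⟩ <;> rw [h]
  · rw [hstep_nil]; rfl
  · rw [hstep_one]; rfl
  · exact hstep_two hab x

-- one loop iteration commutes with sel
lemma step_rel (bbox kb : Int × Int × Int × Int)
    (cL cR : List (Int × (Int × Int × Int × Int))) :
    stepA bbox (sel cL, sel cR) kb
      = ((sel ((stepB bbox (cL, cR) kb).1)), sel ((stepB bbox (cL, cR) kb).2)) := by
  unfold stepA stepB
  by_cases h0 : kb = bbox
  · rw [if_pos h0, if_pos h0]
  rw [if_neg h0, if_neg h0]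
  by_cases hy : |kb.2.1 - bbox.2.1| ≤ 20 ∧ |kb.2.2.2 - bbox.2.2.2| ≤ 20
  · rw [if_pos hy, if_pos hy]
    refine Prod.ext ?_ ?_ <;> dsimp only
    · by_cases hx2 : kb.2.2.1 ≤ bbox.1 + 12
      · by_cases hd : 0 < bbox.1 - kb.2.2.1
        · rw [if_pos hx2, if_pos hd, if_pos (⟨hx2, hd⟩ : _ ∧ _),
            show -(bbox.1 - kb.2.2.1) = kb.2.2.1 - bbox.1 from by ring,
            hstep_sel, ← sel_append]
        · rw [if_pos hx2, if_neg hd, if_neg (fun hc : _ ∧ _ => hd hc.2)]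
      · rw [if_neg hx2, if_neg (fun hc : _ ∧ _ => hx2 hc.1)]
    · by_cases hx1 : bbox.2.2.1 - 12 ≤ kb.1
      · rw [if_pos hx1, if_pos hx1,
          show -(if kb.1 - bbox.2.2.1 < 0 then (0 : Int) else kb.1 - bbox.2.2.1)
              = (if 0 < kb.1 - bbox.2.2.1 then -(kb.1 - bbox.2.2.1) else 0) from by
            split_ifs <;> omega,
          hstep_sel, ← sel_append]
      · rw [if_neg hx1, if_neg hx1]
  · rw [if_neg hy, if_neg hy]

-- the whole loop commutes with sel
lemma fold_bridge (bbox : Int × Int × Int × Int) (l : List (Int × Int × Int × Int)) :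
    ∀ (cL cR : List (Int × (Int × Int × Int × Int))),
    l.foldl (stepA bbox) (sel cL, sel cR)
      = ((sel ((l.foldl (stepB bbox) (cL, cR)).1)), sel ((l.foldl (stepB bbox) (cL, cR)).2)) := by
  induction l with
  | nil => intro cL cR; rfl
  | cons kb t ih =>
    intro cL cR
    simp only [List.foldl_cons]
    rw [step_rel bbox kb cL cR]
    have := ih ((stepB bbox (cL, cR) kb).1) ((stepB bbox (cL, cR) kb).2)
    simpa using this

-- Python's xs[-2:] is last2
lemma slice_neg2 (l : List (Int × (Int × Int × Int × Int))) :
    PySem.List.slice l (some (-2)) = last2 l := by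
  simp only [PySem.List.slice, PySem.List.clampIdx, last2]
  have h : (if (-2 : Int) < 0 then if (l.length : Int) + -2 < 0 then 0
      else ((l.length : Int) + -2).toNat else min (-2 : Int).toNat l.length) = l.length - 2 := by
    split_ifs <;> omega
  rw [h]
  have h2 : l.length - (l.length - 2) = (l.drop (l.length - 2)).length := by simp
  rw [h2, List.take_length]

lemma negEnt_lt {a b : Int × (Int × Int × Int × Int)} (hab : entLt b a = false) :
    entLt (negEnt b) (negEnt a) = decide ((negEnt b).1 < (negEnt a).1) := by
  obtain ⟨a1, a2, a3, a4, a5⟩ := a; obtain ⟨b1, b2, b3, b4, b5⟩ := b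
  simp only [entLt, negEnt, decide_eq_false_iff_not] at *
  rw [decide_eq_decide]
  constructor
  · intro h; omega
  · intro h; omega

-- rendering: A's stable sort by fst of the ≤2 retained entries equals B's full tuple sort
lemma render_eq (c : List (Int × (Int × Int × Int × Int))) :
    PySem.List.sorted ((sel c).map (fun p => (-p.1, p.2))) (fun p => p.1) false = renderB c := by
  unfold renderB
  rw [slice_neg2]
  have hsel : last2 (pySortedTuple c) = sel c := rfl
  rw [hsel]
  have hmap : (sel c).map (fun p => (-p.1, p.2)) = (sel c).map negEnt := rfl
  rw [hmap, PySem.List.sorted_eq_foldl_insertBy]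
  rcases sel_shape c with h | ⟨a, h⟩ | ⟨a, b, h, hab⟩ <;> rw [h]
  · rfl
  · rfl
  · simp only [List.map_cons, List.map_nil, List.foldl_cons, List.foldl_nil]
    unfold pySortedTuple
    simp only [List.foldl_cons, List.foldl_nil]
    simp only [PySem.List.insertBy]
    rw [negEnt_lt hab]

-- ===== VERDICT (by name: the statement is the Claim_ definition above) =====
theorem find_closest_left_right_bbox_spec : Claim_equal_find_closest_left_right_bbox := by
  intro bbox lst _
  unfold Spec_find_closest_left_right_bbox
  unfold find_closest_left_right_bbox find_closest_left_right_bbox_alt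
  have h : lst.foldl (stepA bbox) ([], [])
      = ((sel ((lst.foldl (stepB bbox) (([], []) : _ × _)).1)),
         sel ((lst.foldl (stepB bbox) (([], []) : _ × _)).2)) :=
    fold_bridge bbox lst [] []
  rw [h]
  exact Prod.ext (render_eq _) (render_eq _)
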